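-- pv_equiv track=rewrite | github.com/Ace1928/eidosian_forge | archive_forge/src/archive_forge/func_gen_ep_cheatsheet.py | gen_ep_cheatsheet
-- ===== SOURCE A (Python) =====
-- def gen_ep_cheatsheet(convo):
--     """
--     Generates a cheatsheet for a particular conversation (episode).
--     The index and it's significance in the cheatsheet is shown below:
--         0: First index of a USER that has an ASSISTANT reply to it
--         1: Last index of a USER that has an ASSISTANT reply to it
--         2: First index of an ASSISTANT that has a USER reply to it
--         3: Last index of an ASSISTANT that has a USER reply to it
--         4: Number of examples for USER speech  as text and ASSISTANT speech as label
--         5: Number of examples for ASSISTANT speech as text and USER speech  as label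
--     :param convo:
--         The dialogue between USER and ASSISTANT [after smoothening]
--     """
--     cheatsheet = [-1, -1, -1, -1, 0, 0]
--     for idx in range(1, len(convo)):
--         if convo[idx - 1]['speaker'] == 'USER' and convo[idx]['speaker'] == 'ASSISTANT':
--             if cheatsheet[0] == -1:
--                 cheatsheet[0] = idx - 1
--             cheatsheet[1] = idx - 1
--         if convo[idx - 1]['speaker'] == 'ASSISTANT' and convo[idx]['speaker'] == 'USER':
--             if cheatsheet[2] == -1:
--                 cheatsheet[2] = idx - 1
--             cheatsheet[3] = idx - 1
--         if cheatsheet[1] != -1: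
--             cheatsheet[4] = (cheatsheet[1] - cheatsheet[0]) // 2 + 1
--         if cheatsheet[3] != -1:
--             cheatsheet[5] = (cheatsheet[3] - cheatsheet[2]) // 2 + 1
--     return cheatsheet
-- ===== SOURCE B (Python) =====
-- def gen_ep_cheatsheet(convo):
--     n = len(convo)
--     ua = [i for i in range(n - 1)
--           if convo[i]['speaker'] == 'USER' and convo[i + 1]['speaker'] == 'ASSISTANT']
--     au = [i for i in range(n - 1)
--           if convo[i]['speaker'] == 'ASSISTANT' and convo[i + 1]['speaker'] == 'USER']
--     c0, c1 = (ua[0], ua[-1]) if ua else (-1, -1)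
--     c2, c3 = (au[0], au[-1]) if au else (-1, -1)
--     c4 = (ua[-1] - ua[0]) // 2 + 1 if ua else 0
--     c5 = (au[-1] - au[0]) // 2 + 1 if au else 0
--     return [c0, c1, c2, c3, c4, c5]
-- ===== Notes on version B (the rewrite author's own statement) =====
-- stated objective: simpler
-- what changed: Replaces A's running-state loop (six mutable cells recomputed every iteration) with a collect-then-derive decomposition: materialize the lists of USER->ASSISTANT and ASSISTANT->USER transition start-indices, then read the answers off their endpoints.
import Mathlib
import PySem

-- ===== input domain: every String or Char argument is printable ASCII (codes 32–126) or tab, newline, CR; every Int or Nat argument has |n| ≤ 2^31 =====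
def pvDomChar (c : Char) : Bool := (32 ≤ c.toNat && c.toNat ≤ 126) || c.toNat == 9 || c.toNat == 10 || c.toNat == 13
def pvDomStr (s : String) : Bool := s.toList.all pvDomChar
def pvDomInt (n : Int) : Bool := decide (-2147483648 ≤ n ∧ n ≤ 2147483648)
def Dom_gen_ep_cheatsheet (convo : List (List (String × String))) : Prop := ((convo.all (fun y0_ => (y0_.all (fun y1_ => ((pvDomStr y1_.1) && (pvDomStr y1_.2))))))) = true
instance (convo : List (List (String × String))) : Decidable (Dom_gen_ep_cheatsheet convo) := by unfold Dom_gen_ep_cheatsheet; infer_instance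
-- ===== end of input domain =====

-- B replaces A's running-state loop with "collect transition indices, then derive the answers
-- from the endpoints of the two index lists" (simpler decomposition, same O(n) cost).

-- convo[i]['speaker'] : out-of-range index gives none; dict lookup is first match (none = KeyError,
-- excluded by Pre_). Shared by both ports, since both Pythons use this exact expression.
def pvSpk (convo : List (List (String × String))) (i : Int) : Option String :=
  (PySem.List.pyGet? convo i).bind (fun d => List.lookup "speaker" d)

-- "USER followed by ASSISTANT starting at index i" / "ASSISTANT followed by USER starting at i"
def pvUA (convo : List (List (String × String))) (i : Int) : Bool :=
  pvSpk convo i == some "USER" && pvSpk convo (i + 1) == some "ASSISTANT"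
def pvAU (convo : List (List (String × String))) (i : Int) : Bool :=
  pvSpk convo i == some "ASSISTANT" && pvSpk convo (i + 1) == some "USER"

-- ===== PORT A =====
-- A's loop body: the six mutable cells of `cheatsheet`, updated exactly as the Python does.
def pvStepA (convo : List (List (String × String)))
    (st : Int × Int × Int × Int × Int × Int) (idx : Int) : Int × Int × Int × Int × Int × Int :=
  let (c0, c1, c2, c3, c4, c5) := st
  let (c0, c1) := if pvUA convo (idx - 1) then ((if c0 = -1 then idx - 1 else c0), idx - 1) else (c0, c1)
  let (c2, c3) := if pvAU convo (idx - 1) then ((if c2 = -1 then idx - 1 else c2), idx - 1) else (c2, c3)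
  let c4 := if c1 ≠ -1 then PySem.Int.floordiv (c1 - c0) 2 + 1 else c4
  let c5 := if c3 ≠ -1 then PySem.Int.floordiv (c3 - c2) 2 + 1 else c5
  (c0, c1, c2, c3, c4, c5)

def gen_ep_cheatsheet (convo : List (List (String × String))) : List Int :=
  let st := (PySem.List.pyRange 1 (convo.length : Int) 1).foldl (pvStepA convo) (-1, -1, -1, -1, 0, 0)
  [st.1, st.2.1, st.2.2.1, st.2.2.2.1, st.2.2.2.2.1, st.2.2.2.2.2]

-- ===== PORT B =====
-- the derivation of the six answers from the two transition-index lists (the tail of Source B)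
def pvDerive (ua au : List Int) : List Int :=
  let (c0, c1) := if ua.isEmpty then ((-1 : Int), (-1 : Int)) else (ua.headD 0, ua.getLastD 0)
  let (c2, c3) := if au.isEmpty then ((-1 : Int), (-1 : Int)) else (au.headD 0, au.getLastD 0)
  let c4 := if ua.isEmpty then 0 else PySem.Int.floordiv (ua.getLastD 0 - ua.headD 0) 2 + 1
  let c5 := if au.isEmpty then 0 else PySem.Int.floordiv (au.getLastD 0 - au.headD 0) 2 + 1
  [c0, c1, c2, c3, c4, c5]

def gen_ep_cheatsheet_alt (convo : List (List (String × String))) : List Int :=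
  let ua := (PySem.List.pyRange 0 ((convo.length : Int) - 1) 1).filter (pvUA convo)
  let au := (PySem.List.pyRange 0 ((convo.length : Int) - 1) 1).filter (pvAU convo)
  pvDerive ua au

-- ===== PRECONDITION & SPEC =====
-- Pre_ excludes exactly the inputs where Python A raises KeyError: with at least two turns, every
-- element's 'speaker' key is looked up, so each must be present.
def Pre_gen_ep_cheatsheet (convo : List (List (String × String))) : Prop :=
  convo.length < 2 ∨ ∀ d ∈ convo, (List.lookup "speaker" d).isSome = true
instance (convo : List (List (String × String))) : Decidable (Pre_gen_ep_cheatsheet convo) := by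
  unfold Pre_gen_ep_cheatsheet; infer_instance

def pvWitness_gen_ep_cheatsheet : (List (List (String × String))) :=
  [[("speaker", "USER")], [("speaker", "ASSISTANT")], [("speaker", "USER")]]

def Spec_gen_ep_cheatsheet (convo : List (List (String × String))) (out : List Int) : Prop := out = gen_ep_cheatsheet_alt convo
instance (convo : List (List (String × String))) (out : List Int) : Decidable (Spec_gen_ep_cheatsheet convo out) := by unfold Spec_gen_ep_cheatsheet; infer_instance

-- ===== CLAIM (what is proved, stated in full; the proofs are below) =====
def Claim_equal_gen_ep_cheatsheet : Prop := ∀ (convo : List (List (String × String))), Dom_gen_ep_cheatsheet convo → Pre_gen_ep_cheatsheet convo → Spec_gen_ep_cheatsheet convo (gen_ep_cheatsheet convo)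

-- ===== LEMMAS AND PROOFS =====

-- The abstract state determined by the two lists of transition indices collected so far.
def pvState (ua au : List Int) : Int × Int × Int × Int × Int × Int :=
  ( ua.headD (-1), ua.getLastD (-1), au.headD (-1), au.getLastD (-1),
    if ua.isEmpty then 0 else PySem.Int.floordiv (ua.getLastD (-1) - ua.headD (-1)) 2 + 1,
    if au.isEmpty then 0 else PySem.Int.floordiv (au.getLastD (-1) - au.headD (-1)) 2 + 1 )

lemma getLastD_mem (l : List Int) (hne : l ≠ []) (d : Int) : l.getLastD d ∈ l := by
  induction l generalizing d with
  | nil => exact absurd rfl hne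
  | cons a t ih =>
      cases t with
      | nil => simp
      | cons b u =>
          rw [List.getLastD_cons]
          exact List.mem_cons_of_mem _ (ih (by simp) a)

lemma getLastD_ne (l : List Int) (h : ∀ y ∈ l, 0 ≤ y) (hne : l ≠ []) : l.getLastD (-1) ≠ -1 := by
  have := h _ (getLastD_mem l hne (-1)); omega

lemma headD_concat_upd (l : List Int) (h : ∀ y ∈ l, 0 ≤ y) (i : Int) :
    (if l.headD (-1) = -1 then i else l.headD (-1)) = (l ++ [i]).headD (-1) := by
  cases l with
  | nil => simp
  | cons a t => have := h a (by simp); simp; omega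

lemma getLastD_concat' (l : List Int) (i d : Int) : (l ++ [i]).getLastD d = i := by
  induction l generalizing d with
  | nil => simp
  | cons a t ih => rw [List.cons_append, List.getLastD_cons]; exact ih a

lemma step_state (convo : List (List (String × String))) (ua au : List Int)
    (hua : ∀ y ∈ ua, 0 ≤ y) (hau : ∀ y ∈ au, 0 ≤ y) (i : Int) (hi : 0 ≤ i) :
    pvStepA convo (pvState ua au) (i + 1)
      = pvState (ua ++ if pvUA convo i then [i] else []) (au ++ if pvAU convo i then [i] else []) := by
  have h1 : i + 1 - 1 = i := by ring
  have hkeep : ∀ (l : List Int), (∀ y ∈ l, 0 ≤ y) →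
      (if l.getLastD (-1) ≠ -1 then
        PySem.Int.floordiv (l.getLastD (-1) - l.headD (-1)) 2 + 1
       else if l.isEmpty then (0:Int) else PySem.Int.floordiv (l.getLastD (-1) - l.headD (-1)) 2 + 1)
      = (if l.isEmpty then 0 else PySem.Int.floordiv (l.getLastD (-1) - l.headD (-1)) 2 + 1) := by
    intro l hl
    by_cases he : l = []
    · subst he; simp
    · rw [if_pos (getLastD_ne l hl he)]; simp [he]
  have hupd : ∀ (l : List Int), (∀ y ∈ l, 0 ≤ y) →
      (if i ≠ -1 then
        PySem.Int.floordiv (i - (l ++ [i]).headD (-1)) 2 + 1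
       else if l.isEmpty then (0:Int) else PySem.Int.floordiv (l.getLastD (-1) - l.headD (-1)) 2 + 1)
      = (if (l ++ [i]).isEmpty then 0
         else PySem.Int.floordiv (i - (l ++ [i]).headD (-1)) 2 + 1) := by
    intro l hl
    rw [if_pos (by omega)]
    simp
  rcases hP : pvUA convo i <;> rcases hQ : pvAU convo i <;>
    simp only [pvStepA, pvState, h1, hP, hQ, Bool.false_eq_true, ite_true, ite_false,
      List.append_nil, headD_concat_upd ua hua i, headD_concat_upd au hau i,
      getLastD_concat']
  · rw [hkeep ua hua, hkeep au hau]
  · rw [hkeep ua hua, hupd au hau]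
  · rw [hupd ua hua, hkeep au hau]
  · rw [hupd ua hua, hupd au hau]

lemma loop_eq (convo : List (List (String × String))) (m : Nat) :
    (PySem.List.pyRange 1 (1 + (m : Int)) 1).foldl (pvStepA convo) (-1, -1, -1, -1, 0, 0)
      = pvState ((PySem.List.pyRange 0 (m : Int) 1).filter (pvUA convo))
               ((PySem.List.pyRange 0 (m : Int) 1).filter (pvAU convo)) := by
  induction m with
  | zero =>
      simp [PySem.List.pyRange_one_eq_nil, pvState]
  | succ k ih =>
      have e1 : (1 : Int) + ((k : Int) + 1) = (1 + (k : Int)) + 1 := by ring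
      have h2 : PySem.List.pyRange 1 (1 + ((k : Int) + 1)) 1
          = PySem.List.pyRange 1 (1 + (k : Int)) 1 ++ [1 + (k : Int)] := by
        rw [e1, PySem.List.pyRange_one_succ_right (by omega)]
      have h3 : PySem.List.pyRange 0 ((k : Int) + 1) 1
          = PySem.List.pyRange 0 (k : Int) 1 ++ [(k : Int)] := by
        rw [PySem.List.pyRange_one_succ_right (by omega)]
      have hpos : ∀ p : Int → Bool, ∀ y ∈ (PySem.List.pyRange 0 (k : Int) 1).filter p, 0 ≤ y := by
        intro p y hy
        have := (PySem.List.mem_pyRange_one).1 (List.mem_of_mem_filter hy)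
        omega
      have e2 : (1 : Int) + (k : Int) = (k : Int) + 1 := by ring
      push_cast
      rw [h2, List.foldl_append, ih, h3, List.filter_append, List.filter_append, e2]
      rw [List.foldl_cons, List.foldl_nil,
        step_state convo _ _ (hpos _) (hpos _) (k : Int) (by positivity)]
      rcases hu : pvUA convo (k : Int) <;> rcases ha : pvAU convo (k : Int) <;>
        simp [hu, ha]

lemma getD_last_any (x : Int) (t : List Int) :
    (x :: t).getLast?.getD 0 = (x :: t).getLast?.getD (-1) := by
  rw [List.getLast?_eq_some_getLast (l := x :: t) (by simp)]
  rfl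

lemma derive_eq (ua au : List Int) :
    pvDerive ua au
      = [ua.headD (-1), ua.getLastD (-1), au.headD (-1), au.getLastD (-1),
         if ua.isEmpty then 0 else PySem.Int.floordiv (ua.getLastD (-1) - ua.headD (-1)) 2 + 1,
         if au.isEmpty then 0 else PySem.Int.floordiv (au.getLastD (-1) - au.headD (-1)) 2 + 1] := by
  cases ua <;> cases au <;> simp [pvDerive, getD_last_any]

lemma alt_eq_state (convo : List (List (String × String))) :
    gen_ep_cheatsheet_alt convo
      = (fun st => [st.1, st.2.1, st.2.2.1, st.2.2.2.1, st.2.2.2.2.1, st.2.2.2.2.2])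
          (pvState ((PySem.List.pyRange 0 ((convo.length : Int) - 1) 1).filter (pvUA convo))
                   ((PySem.List.pyRange 0 ((convo.length : Int) - 1) 1).filter (pvAU convo))) := by
  calc gen_ep_cheatsheet_alt convo
      = pvDerive ((PySem.List.pyRange 0 ((convo.length : Int) - 1) 1).filter (pvUA convo))
                 ((PySem.List.pyRange 0 ((convo.length : Int) - 1) 1).filter (pvAU convo)) := rfl
    _ = _ := by rw [derive_eq]; rfl

-- ===== VERDICT (by name: the statement is the Claim_ definition above) =====
theorem gen_ep_cheatsheet_spec : Claim_equal_gen_ep_cheatsheet := by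
  intro convo _ _
  unfold Spec_gen_ep_cheatsheet gen_ep_cheatsheet
  rw [alt_eq_state]
  cases convo with
  | nil => simp [PySem.List.pyRange_one_eq_nil, pvState]
  | cons d t =>
      have e : ((d :: t).length : Int) = 1 + (t.length : Int) := by
        push_cast [List.length_cons]; ring
      have e2 : ((d :: t).length : Int) - 1 = (t.length : Int) := by
        simp [List.length_cons]
      rw [e2, e, loop_eq]
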